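-- pv_equiv track=rewrite | github.com/Tuprott991/VertexAI-MCP | mcp_client/insurance_service.py | _parse_history_text
-- ===== SOURCE A (Python) =====
-- from typing import List, Dict, Any, Optional, Tuple
--
-- def _parse_history_text(history_text: str) -> List[Dict[str, Any]]:
--     """Parse formatted history text into message objects"""
--     messages = []
--     # This is a simple parser - could be enhanced based on actual format
--     lines = history_text.split('\n')
--     current_message = None
--
--     for line in lines:
--         line = line.strip()
--         if line.startswith('User:') or line.startswith('Question:'):
--             if current_message:
--                 messages.append(current_message)
--             current_message = {"role": "user", "content": line[line.find(':')+1:].strip()}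
--         elif line.startswith('Assistant:') or line.startswith('Answer:'):
--             if current_message:
--                 messages.append(current_message)
--             current_message = {"role": "assistant", "content": line[line.find(':')+1:].strip()}
--         elif current_message and line:
--             current_message["content"] += " " + line
--
--     if current_message:
--         messages.append(current_message)
--
--     return messages
-- ===== SOURCE B (Python) =====
-- def _parse_history_text(history_text):
--     """Parse formatted history text into message objects.
--
--     Two-pass: segment the stripped lines into blocks at header lines, then
--     build each message by joining the seed with its non-empty continuation
--     lines."""
--     def header_role(line):
--         if line.startswith('User:') or line.startswith('Question:'):
--             return 'user'
--         if line.startswith('Assistant:') or line.startswith('Answer:'):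
--             return 'assistant'
--         return None
--
--     lines = [l.strip() for l in history_text.split('\n')]
--     # drop anything before the first header line
--     while lines and header_role(lines[0]) is None:
--         lines.pop(0)
--
--     messages = []
--     while lines:
--         role = header_role(lines[0])
--         seed = lines[0][lines[0].find(':') + 1:].strip()
--         i = 1
--         while i < len(lines) and header_role(lines[i]) is None:
--             i += 1
--         body = [l for l in lines[1:i] if l]
--         messages.append({"role": role, "content": " ".join([seed] + body)})
--         lines = lines[i:]
--     return messages
-- ===== Notes on version B (the rewrite author's own statement) =====
-- stated objective: alternative
-- what changed: Replaces A's single flush-inside-the-loop parser (mutating a current-message dict) by a two-pass decomposition: strip lines, drop the prefix before the first header, segment into header-led blocks by span, then build each message by space-joining the seed with its non-empty continuation lines.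
import Mathlib
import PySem

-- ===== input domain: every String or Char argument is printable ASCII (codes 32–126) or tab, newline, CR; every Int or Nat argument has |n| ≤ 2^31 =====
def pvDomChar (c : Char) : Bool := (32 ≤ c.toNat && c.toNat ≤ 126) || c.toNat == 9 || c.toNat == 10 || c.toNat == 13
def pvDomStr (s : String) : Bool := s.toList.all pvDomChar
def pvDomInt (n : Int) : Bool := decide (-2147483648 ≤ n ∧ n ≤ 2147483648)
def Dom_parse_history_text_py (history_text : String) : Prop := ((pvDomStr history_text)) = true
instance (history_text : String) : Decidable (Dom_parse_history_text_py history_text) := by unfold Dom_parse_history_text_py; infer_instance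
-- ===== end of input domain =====

-- B replaces A's flush-inside-one-loop parser by a two-pass decomposition (segment the
-- stripped lines into header-led blocks, then join each block's pieces); same cost,
-- alternative structure.

-- ===== PORT A =====
-- history_text.split('\n')  (sep is the non-empty literal '\n', so Python never raises)
def pvLines (s : String) : List String :=
  (PySem.Chars.splitOn s.toList ['\n']).map String.ofList

-- the two-key dict {"role": r, "content": c} is represented as the association list
-- [("role", r), ("content", c)]; A's in-place `content +=` updates the c component
def pvFlush (messages : List (List (String × String))) (cur : Option (String × String)) :
    List (List (String × String)) :=
  match cur with
  | some (r, c) => messages ++ [[("role", r), ("content", c)]]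
  | none => messages

-- line[line.find(':')+1:].strip()
def pvAfterColon (line : String) : String :=
  PySem.Str.strip (PySem.Str.slice line (some (PySem.Str.find line ":" + 1)) none)

-- the body of A's for-loop, on the already-stripped line
def pvStepA (st : List (List (String × String)) × Option (String × String)) (line : String) :
    List (List (String × String)) × Option (String × String) :=
  if PySem.Str.startswith line "User:" || PySem.Str.startswith line "Question:" then
    (pvFlush st.1 st.2, some ("user", pvAfterColon line))
  else if PySem.Str.startswith line "Assistant:" || PySem.Str.startswith line "Answer:" then
    (pvFlush st.1 st.2, some ("assistant", pvAfterColon line))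
  else
    match st.2 with
    | some (r, c) => if line ≠ "" then (st.1, some (r, c ++ " " ++ line)) else (st.1, some (r, c))
    | none => (st.1, none)

def parse_history_text_py (history_text : String) : List (List (String × String)) :=
  let st := (pvLines history_text).foldl
    (fun st line => pvStepA st (PySem.Str.strip line)) ([], none)
  pvFlush st.1 st.2

-- ===== PORT B =====
def pvHeaderRole (line : String) : Option String :=
  if PySem.Str.startswith line "User:" || PySem.Str.startswith line "Question:" then some "user"
  else if PySem.Str.startswith line "Assistant:" || PySem.Str.startswith line "Answer:" then
    some "assistant"
  else none

-- second pass: each call consumes one header-led block (header line, then the span of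
-- non-header lines); Source B's inner while-loop is the takeWhile/dropWhile span
def pvBuild : List String → List (List (String × String))
  | [] => []
  | l :: rest =>
    match pvHeaderRole l with
    | none => []   -- unreachable: pvBuild is only applied to lists starting with a header line
    | some role =>
      let body := (rest.takeWhile (fun x => (pvHeaderRole x).isNone)).filter (fun x => x ≠ "")
      let rest' := rest.dropWhile (fun x => (pvHeaderRole x).isNone)
      [("role", role), ("content", PySem.Str.join " " (pvAfterColon l :: body))] :: pvBuild rest'
termination_by ls => ls.length
decreasing_by
  simp only [List.length_cons]
  exact Nat.lt_succ_of_le (List.length_dropWhile_le _ _)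

def parse_history_text_py_alt (history_text : String) : List (List (String × String)) :=
  let lines := (pvLines history_text).map PySem.Str.strip
  pvBuild (lines.dropWhile (fun l => (pvHeaderRole l).isNone))

-- ===== PRECONDITION & SPEC =====
def Spec_parse_history_text_py (history_text : String) (out : List (List (String × String))) : Prop := out = parse_history_text_py_alt history_text
instance (history_text : String) (out : List (List (String × String))) : Decidable (Spec_parse_history_text_py history_text out) := by unfold Spec_parse_history_text_py; infer_instance

-- ===== CLAIM (what is proved, stated in full; the proofs are below) =====
def Claim_equal_parse_history_text_py : Prop := ∀ (history_text : String), Dom_parse_history_text_py history_text → Spec_parse_history_text_py history_text (parse_history_text_py history_text)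

-- ===== LEMMAS AND PROOFS =====

lemma pvJoin_singleton (c : String) : PySem.Str.join " " [c] = c := by
  have h : (PySem.Str.join " " [c]).toList = c.toList := by
    simp [PySem.Str.toList_join, PySem.Chars.join_singleton]
  exact String.ext (by simpa [String.toList] using h)

lemma pvJoin_glue (a b : String) (t : List String) :
    PySem.Str.join " " ((a ++ " " ++ b) :: t) = PySem.Str.join " " (a :: b :: t) := by
  apply String.ext
  have h : (PySem.Str.join " " ((a ++ " " ++ b) :: t)).toList
      = (PySem.Str.join " " (a :: b :: t)).toList := by
    cases t with
    | nil =>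
      simp [PySem.Str.toList_join, PySem.Chars.join_singleton, PySem.Chars.join_cons_cons]
    | cons q r =>
      simp [PySem.Str.toList_join, PySem.Chars.join_cons_cons, List.append_assoc]
  simpa [String.toList] using h

lemma pvStepA_header (st : List (List (String × String)) × Option (String × String))
    (l role : String) (h : pvHeaderRole l = some role) :
    pvStepA st l = (pvFlush st.1 st.2, some (role, pvAfterColon l)) := by
  unfold pvHeaderRole at h
  unfold pvStepA
  split_ifs at h ⊢ <;> simp_all

lemma pvStepA_nonheader_some (msgs : List (List (String × String))) (r c l : String)
    (h : pvHeaderRole l = none) :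
    pvStepA (msgs, some (r, c)) l
      = if l ≠ "" then (msgs, some (r, c ++ " " ++ l)) else (msgs, some (r, c)) := by
  unfold pvHeaderRole at h
  unfold pvStepA
  split_ifs at h ⊢ <;> simp_all

lemma pvStepA_nonheader_none (msgs : List (List (String × String))) (l : String)
    (h : pvHeaderRole l = none) :
    pvStepA (msgs, none) l = (msgs, none) := by
  unfold pvHeaderRole at h
  unfold pvStepA
  split_ifs at h ⊢ <;> simp_all

lemma pvBuild_nil : pvBuild [] = [] := by
  rw [pvBuild.eq_def]

lemma pvBuild_cons_header (l : String) (rest : List String) (role : String)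
    (h : pvHeaderRole l = some role) :
    pvBuild (l :: rest)
      = [("role", role), ("content", PySem.Str.join " "
          (pvAfterColon l :: (rest.takeWhile (fun x => (pvHeaderRole x).isNone)).filter
            (fun x => x ≠ "")))] ::
        pvBuild (rest.dropWhile (fun x => (pvHeaderRole x).isNone)) := by
  rw [pvBuild.eq_def]
  simp [h]

lemma pvLsome (ls : List String) :
    ∀ (msgs : List (List (String × String))) (r c : String),
    pvFlush (List.foldl pvStepA (msgs, some (r, c)) ls).1
            (List.foldl pvStepA (msgs, some (r, c)) ls).2
      = msgs ++ [("role", r), ("content",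
          PySem.Str.join " " (c :: (ls.takeWhile (fun x => (pvHeaderRole x).isNone)).filter
            (fun x => x ≠ "")))] ::
          pvBuild (ls.dropWhile (fun x => (pvHeaderRole x).isNone)) := by
  induction ls with
  | nil => intro msgs r c; simp [pvFlush, pvBuild_nil, pvJoin_singleton]
  | cons l t ih =>
    intro msgs r c
    cases hh : pvHeaderRole l with
    | some role =>
      rw [List.foldl_cons, pvStepA_header _ _ _ hh, ih]
      simp only [List.takeWhile_cons, List.dropWhile_cons, hh, Option.isNone_some,
        Bool.false_eq_true, if_false]
      rw [pvBuild_cons_header _ _ _ hh]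
      simp [pvFlush, pvJoin_singleton]
    | none =>
      by_cases h3 : l = ""
      · subst h3
        rw [List.foldl_cons, pvStepA_nonheader_some _ _ _ _ hh]
        simp [hh, ih]
      · rw [List.foldl_cons, pvStepA_nonheader_some _ _ _ _ hh]
        simp only [h3, if_pos, ne_eq, not_false_iff]
        rw [ih]
        simp [hh, h3, pvJoin_glue]

lemma pvLnone (ls : List String) :
    ∀ (msgs : List (List (String × String))),
    pvFlush (List.foldl pvStepA (msgs, none) ls).1 (List.foldl pvStepA (msgs, none) ls).2
      = msgs ++ pvBuild (ls.dropWhile (fun x => (pvHeaderRole x).isNone)) := by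
  induction ls with
  | nil => intro msgs; simp [pvFlush, pvBuild_nil]
  | cons l t ih =>
    intro msgs
    cases hh : pvHeaderRole l with
    | some role =>
      rw [List.foldl_cons, pvStepA_header _ _ _ hh, pvLsome]
      simp only [List.dropWhile_cons, hh, Option.isNone_some, Bool.false_eq_true, if_false]
      rw [pvBuild_cons_header _ _ _ hh]
      simp [pvFlush]
    | none =>
      rw [List.foldl_cons, pvStepA_nonheader_none _ _ hh, ih]
      simp [hh]

-- ===== VERDICT (by name: the statement is the Claim_ definition above) =====
theorem parse_history_text_py_spec : Claim_equal_parse_history_text_py := by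
  intro t _
  unfold Spec_parse_history_text_py parse_history_text_py parse_history_text_py_alt
  rw [← List.foldl_map (f := PySem.Str.strip) (g := pvStepA)]
  simpa using pvLnone ((pvLines t).map PySem.Str.strip) []
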